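-- pv_equiv track=rewrite | github.com/hy3440/diffSimilarTech | code/tech_sentences.py | contains_tech
-- ===== SOURCE A (Python) =====
-- def contains_tech(tech, words):
--     if "_" in tech:
--         tech_list = tech.split("_")
--         n = len(tech_list)
--         for i in range(len(words) - n + 1):
--             if tech_list == words[i:i+n]:
--                 return True
--         return False
--     else:
--         return tech in words
-- ===== SOURCE B (Python) =====
-- def contains_tech(tech, words):
--     # One-pass parallel matcher: scan words once, maintaining the set of
--     # partial-match lengths (NFA simulation), instead of re-comparing a
--     # slice of words at every start index.
--     if "_" not in tech:
--         return tech in words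
--     t = tech.split("_")
--     n = len(t)
--     active = [0]
--     for w in words:
--         nxt = [l + 1 for l in active if t[l] == w]
--         if n in nxt:
--             return True
--         active = nxt
--         active.append(0)
--     return False
-- ===== Notes on version B (the rewrite author's own statement) =====
-- stated objective: alternative
-- what changed: Replaces A's try-every-start-index loop that compares a fresh n-slice of words at each position with a single left-to-right pass over words that maintains the list of current partial-match lengths (parallel/NFA-style matching), so no slices are built and words is traversed once.
import Mathlib
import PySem

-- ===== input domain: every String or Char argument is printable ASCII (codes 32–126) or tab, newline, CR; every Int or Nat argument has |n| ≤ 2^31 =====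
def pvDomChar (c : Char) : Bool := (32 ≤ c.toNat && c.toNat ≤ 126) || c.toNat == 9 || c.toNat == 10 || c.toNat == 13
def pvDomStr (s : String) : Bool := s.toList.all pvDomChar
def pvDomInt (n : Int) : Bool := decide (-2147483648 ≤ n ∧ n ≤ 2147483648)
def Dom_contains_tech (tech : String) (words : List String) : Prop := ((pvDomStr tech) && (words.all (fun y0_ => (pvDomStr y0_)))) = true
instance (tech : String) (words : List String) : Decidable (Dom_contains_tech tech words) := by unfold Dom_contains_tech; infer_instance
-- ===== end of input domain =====

-- B replaces A's restart-at-every-index slice comparison by a single left-to-right pass that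
-- maintains the set of partial-match lengths (parallel/NFA matching); objective: alternative.


-- ===== PORT A =====
-- 'tech.split("_")': the separator is the nonempty literal "_", so Python's split never raises
-- and PySem.Str.split? is always 'some'; '.getD []' only unwraps that.
def contains_tech (tech : String) (words : List String) : Bool :=
  if PySem.Str.isIn "_" tech then
    let tech_list := (PySem.Str.split? tech "_").getD []
    let n := tech_list.length
    -- 'for i in range(len(words) - n + 1): if tech_list == words[i:i+n]: return True' / 'return False'
    (PySem.List.pyRange 0 ((words.length : Int) - (n : Int) + 1) 1).any
      (fun i => PySem.List.slice words (some i) (some (i + (n : Int))) == tech_list)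
  else
    words.contains tech

-- ===== PORT B =====
-- the scan loop of Source B: 'active' is the list of partial-match lengths; early 'return True'
-- becomes the 'if … then true' branch.  't.getD l ""' ports Python's 't[l]': every l placed in
-- 'active' satisfies l < len(t) (initial 0, and l+1 is kept only when l+1 ≠ len(t)), so the
-- default is never read where the Python code runs.
def altStep (t : List String) (n : Nat) : List Nat → List String → Bool
  | _, [] => false
  | active, w :: ws =>
    let nxt := (active.filter (fun l => t.getD l "" == w)).map (· + 1)
    if nxt.contains n then true else altStep t n (nxt ++ [0]) ws

def contains_tech_alt (tech : String) (words : List String) : Bool :=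
  if PySem.Str.isIn "_" tech then
    let t := (PySem.Str.split? tech "_").getD []
    altStep t t.length [0] words
  else
    words.contains tech

-- ===== PRECONDITION & SPEC =====
def Spec_contains_tech (tech : String) (words : List String) (out : Bool) : Prop := out = contains_tech_alt tech words
instance (tech : String) (words : List String) (out : Bool) : Decidable (Spec_contains_tech tech words out) := by unfold Spec_contains_tech; infer_instance

-- ===== CLAIM (what is proved, stated in full; the proofs are below) =====
def Claim_equal_contains_tech : Prop := ∀ (tech : String) (words : List String), Dom_contains_tech tech words → Spec_contains_tech tech words (contains_tech tech words)

-- ===== LEMMAS AND PROOFS =====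

-- Python's split always returns a nonempty list.
theorem splitOn_go_ne_nil (sep : List Char) : ∀ (fuel : Nat) (l cur : List Char) (acc : List (List Char)),
    PySem.Chars.splitOn.go sep fuel l cur acc ≠ [] := by
  intro fuel
  induction fuel with
  | zero => intro l cur acc; simp [PySem.Chars.splitOn.go]
  | succ f ih =>
    intro l cur acc
    cases l with
    | nil => simp [PySem.Chars.splitOn.go]
    | cons c rest =>
      rw [PySem.Chars.splitOn.go]
      split
      · exact ih _ _ _
      · exact ih _ _ _

theorem splitOn_ne_nil (s sep : List Char) : PySem.Chars.splitOn s sep ≠ [] := by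
  unfold PySem.Chars.splitOn; exact splitOn_go_ne_nil _ _ _ _ _

-- t is an infix of w iff some window of w equals t.
theorem infix_iff_window (t w : List String) :
    t <:+: w ↔ ∃ k : Nat, k + t.length ≤ w.length ∧ (w.drop k).take t.length = t := by
  constructor
  · rintro ⟨s, u, rfl⟩
    refine ⟨s.length, by simp, ?_⟩
    simp [List.drop_left' rfl, List.take_left' rfl]
  · rintro ⟨k, hk, ht⟩
    have h1 : t <+: w.drop k := ht ▸ List.take_prefix _ _
    exact h1.isInfix.trans (w.drop_suffix k).isInfix

-- A's range-of-slices loop tests exactly the windows.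
theorem portA_loop_iff (t w : List String) :
    ((PySem.List.pyRange 0 ((w.length : Int) - (t.length : Int) + 1) 1).any
      (fun i => PySem.List.slice w (some i) (some (i + (t.length : Int))) == t)) = true ↔ t <:+: w := by
  rw [infix_iff_window, List.any_eq_true]
  constructor
  · rintro ⟨i, hmem, hi⟩
    rw [PySem.List.mem_pyRange_one] at hmem
    obtain ⟨h0, hlt⟩ := hmem
    obtain ⟨k, rfl⟩ := Int.eq_ofNat_of_zero_le h0
    refine ⟨k, by omega, ?_⟩
    rw [PySem.List.slice_natCast_add] at hi
    exact (beq_iff_eq.mp hi)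
  · rintro ⟨k, hk, ht⟩
    refine ⟨(k : Int), ?_, ?_⟩
    · rw [PySem.List.mem_pyRange_one]; omega
    · rw [PySem.List.slice_natCast_add]
      exact beq_iff_eq.mpr ht

theorem suffix_concat_concat {α : Type} (a b : List α) (x y : α) :
    a ++ [x] <:+ b ++ [y] ↔ a <:+ b ∧ x = y := by
  rw [← List.reverse_prefix]
  simp only [List.reverse_append, List.reverse_singleton, List.singleton_append, List.cons_prefix_cons]
  rw [List.reverse_prefix]
  tauto

theorem take_succ_of_lt {α : Type} [Inhabited α] (t : List α) (l : Nat) (h : l < t.length) :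
    t.take (l + 1) = t.take l ++ [t[l]] := by
  rw [List.take_add_one, List.getElem?_eq_getElem h]
  rfl

-- loop invariant: after consuming p, 'active' holds exactly the l < |t| with t.take l a suffix of p
theorem altStep_iff (t : List String) (hne : t ≠ []) :
    ∀ (ws p : List String) (active : List Nat),
    (∀ l : Nat, l ∈ active ↔ (l < t.length ∧ t.take l <:+ p)) →
    (altStep t t.length active ws = true ↔ ∃ j : Nat, 1 ≤ j ∧ j ≤ ws.length ∧ t <:+ p ++ ws.take j) := by
  have hnpos : 0 < t.length := List.length_pos_iff.mpr hne
  intro ws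
  induction ws with
  | nil =>
    intro p active hInv
    simp [altStep]
  | cons w ws ih =>
    intro p active hInv
    have hmem : ∀ l' : Nat,
        (l' ∈ (active.filter (fun l => t.getD l "" == w)).map (· + 1)) ↔
        ∃ l, l ∈ active ∧ t.getD l "" = w ∧ l' = l + 1 := by
      intro l'
      simp only [List.mem_map, List.mem_filter, beq_iff_eq]
      constructor
      · rintro ⟨l, ⟨hl, hw⟩, rfl⟩; exact ⟨l, hl, hw, rfl⟩
      · rintro ⟨l, hl, hw, rfl⟩; exact ⟨l, ⟨hl, hw⟩, rfl⟩
    have hfull : ((active.filter (fun l => t.getD l "" == w)).map (· + 1)).contains t.length = true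
        ↔ t <:+ p ++ [w] := by
      rw [List.contains_eq_mem, decide_eq_true_iff, hmem]
      constructor
      · rintro ⟨l, hl, hw, hn⟩
        obtain ⟨hlt, hsuf⟩ := (hInv l).mp hl
        have ht : t = t.take l ++ [t[l]] := by
          rw [← take_succ_of_lt t l hlt, ← hn, List.take_length]
        rw [ht]
        rw [suffix_concat_concat]
        refine ⟨hsuf, ?_⟩
        rw [← hw, List.getD_eq_getElem t "" hlt]
      · intro hsuf
        refine ⟨t.length - 1, ?_, ?_, by omega⟩
        · rw [hInv]
          refine ⟨by omega, ?_⟩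
          have ht : t = t.take (t.length - 1) ++ [t[t.length - 1]] := by
            rw [← take_succ_of_lt t _ (by omega)]
            have : t.length - 1 + 1 = t.length := by omega
            rw [this, List.take_length]
          rw [ht, suffix_concat_concat] at hsuf
          exact hsuf.1
        · have ht : t = t.take (t.length - 1) ++ [t[t.length - 1]] := by
            rw [← take_succ_of_lt t _ (by omega)]
            have : t.length - 1 + 1 = t.length := by omega
            rw [this, List.take_length]
          rw [ht, suffix_concat_concat] at hsuf
          rw [List.getD_eq_getElem t "" (by omega)]
          exact hsuf.2
    rw [altStep]
    by_cases hc : ((active.filter (fun l => t.getD l "" == w)).map (· + 1)).contains t.length = true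
    · simp only [hc, if_true]
      constructor
      · intro _
        exact ⟨1, le_refl _, by simp, by simpa using hfull.mp hc⟩
      · intro _; trivial
    · have hc' : ((active.filter (fun l => t.getD l "" == w)).map (· + 1)).contains t.length = false := by
        simpa using hc
      have hnots : ¬ t <:+ p ++ [w] := fun h => hc (hfull.mpr h)
      simp only [hc', if_false, Bool.false_eq_true]
      have hInv' : ∀ l' : Nat, l' ∈ ((active.filter (fun l => t.getD l "" == w)).map (· + 1)) ++ [0] ↔
          (l' < t.length ∧ t.take l' <:+ p ++ [w]) := by
        intro l'
        rw [List.mem_append, List.mem_singleton, hmem]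
        constructor
        · rintro (⟨l, hl, hw, rfl⟩ | rfl)
          · obtain ⟨hlt, hsuf⟩ := (hInv l).mp hl
            have hne' : l + 1 ≠ t.length := by
              intro h
              have hmemn : t.length ∈ (active.filter (fun ll => t.getD ll "" == w)).map (· + 1) :=
                h ▸ (hmem _).mpr ⟨l, hl, hw, rfl⟩
              apply hc
              rw [List.contains_eq_mem, decide_eq_true_iff]
              exact hmemn
            refine ⟨by omega, ?_⟩
            rw [take_succ_of_lt t l hlt, suffix_concat_concat]
            refine ⟨hsuf, ?_⟩
            rw [← hw, List.getD_eq_getElem t "" hlt]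
          · exact ⟨hnpos, by simp⟩
        · rintro ⟨hlt, hsuf⟩
          cases l' with
          | zero => exact Or.inr rfl
          | succ m =>
            refine Or.inl ⟨m, ?_, ?_, rfl⟩
            · rw [hInv]
              refine ⟨by omega, ?_⟩
              rw [take_succ_of_lt t m (by omega), suffix_concat_concat] at hsuf
              exact hsuf.1
            · rw [take_succ_of_lt t m (by omega), suffix_concat_concat] at hsuf
              rw [List.getD_eq_getElem t "" (by omega)]
              exact hsuf.2
      rw [ih (p ++ [w]) _ hInv']
      constructor
      · rintro ⟨j, hj1, hj2, hsuf⟩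
        refine ⟨j + 1, by omega, by simpa using by omega, ?_⟩
        simpa [List.append_assoc] using hsuf
      · rintro ⟨j, hj1, hj2, hsuf⟩
        cases j with
        | zero => omega
        | succ m =>
          cases m with
          | zero =>
            exfalso
            apply hnots
            simpa using hsuf
          | succ m' =>
            refine ⟨m' + 1, by omega, ?_, ?_⟩
            · simp at hj2; omega
            · simpa [List.append_assoc] using hsuf

theorem portB_iff (t w : List String) (hne : t ≠ []) :
    altStep t t.length [0] w = true ↔ t <:+: w := by
  have hnpos : 0 < t.length := List.length_pos_iff.mpr hne
  have hInv0 : ∀ l : Nat, l ∈ ([0] : List Nat) ↔ (l < t.length ∧ t.take l <:+ ([] : List String)) := by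
    intro l
    simp only [List.mem_singleton, List.suffix_nil]
    constructor
    · rintro rfl; exact ⟨hnpos, by simp⟩
    · rintro ⟨hl, htake⟩
      rcases List.take_eq_nil_iff.mp htake with h | h
      · exact h
      · exact absurd h hne
  rw [altStep_iff t hne w [] [0] hInv0]
  simp only [List.nil_append]
  constructor
  · rintro ⟨j, _, _, hsuf⟩
    exact hsuf.isInfix.trans (w.take_prefix j).isInfix
  · rintro ⟨s, u, rfl⟩
    refine ⟨s.length + t.length, by omega, by simp, ?_⟩
    have h1 : (s ++ t ++ u).take (s.length + t.length) = s ++ t :=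
      List.take_left' (by simp)
    rw [h1]
    exact List.suffix_append s t

-- ===== VERDICT (by name: the statement is the Claim_ definition above) =====
theorem contains_tech_spec : Claim_equal_contains_tech := by
  intro tech words _
  unfold Spec_contains_tech contains_tech contains_tech_alt
  by_cases h : PySem.Str.isIn "_" tech = true
  · simp only [h, if_true]
    have hs : PySem.Str.split? tech "_" =
        some (List.map String.ofList (PySem.Chars.splitOn tech.toList "_".toList)) := by
      simp [PySem.Str.split?, PySem.Chars.split?]
    have hne : ((PySem.Str.split? tech "_").getD []) ≠ [] := by
      rw [hs]
      intro hnil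
      simp only [Option.getD_some, List.map_eq_nil_iff] at hnil
      exact splitOn_ne_nil tech.toList "_".toList hnil
    rw [Bool.eq_iff_iff,
       portA_loop_iff ((PySem.Str.split? tech "_").getD []) words,
       portB_iff ((PySem.Str.split? tech "_").getD []) words hne]
  · rw [Bool.not_eq_true] at h
    simp only [h, Bool.false_eq_true, if_false]
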